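-- pv_equiv track=rewrite | github.com/Sayed-Esmail/Scanner1 | parser.py | is_simple_grammar
-- ===== SOURCE A (Python) =====
-- def is_simple_grammar(grammar):
--     for non_terminal, productions in grammar.items():
--         first_terminals = set()
--         for production in productions:
--             if not production or production[0].isupper():
--                 return False
--             first_char = production[0]
--             if first_char in first_terminals:
--                 return False
--             first_terminals.add(first_char)
--     return True
-- ===== SOURCE B (Python) =====
-- def is_simple_grammar(grammar):
--     return all(_rule_ok(productions) for productions in grammar.values())
--
--
-- def _rule_ok(productions):
--     # validity pass: every production non-empty and starting with a terminal
--     if any(not p or p[0].isupper() for p in productions):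
--         return False
--     # uniqueness of leading terminals by sort-then-adjacent-scan
--     firsts = sorted(p[0] for p in productions)
--     return not any(x == y for x, y in zip(firsts, firsts[1:]))
-- ===== Notes on version B (the rewrite author's own statement) =====
-- stated objective: alternative
-- what changed: Duplicate detection of leading terminals is done by sorting the firsts and scanning adjacent pairs instead of A's incremental seen-set membership loop; the whole check is expressed as all() over a per-rule predicate.
import Mathlib
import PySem

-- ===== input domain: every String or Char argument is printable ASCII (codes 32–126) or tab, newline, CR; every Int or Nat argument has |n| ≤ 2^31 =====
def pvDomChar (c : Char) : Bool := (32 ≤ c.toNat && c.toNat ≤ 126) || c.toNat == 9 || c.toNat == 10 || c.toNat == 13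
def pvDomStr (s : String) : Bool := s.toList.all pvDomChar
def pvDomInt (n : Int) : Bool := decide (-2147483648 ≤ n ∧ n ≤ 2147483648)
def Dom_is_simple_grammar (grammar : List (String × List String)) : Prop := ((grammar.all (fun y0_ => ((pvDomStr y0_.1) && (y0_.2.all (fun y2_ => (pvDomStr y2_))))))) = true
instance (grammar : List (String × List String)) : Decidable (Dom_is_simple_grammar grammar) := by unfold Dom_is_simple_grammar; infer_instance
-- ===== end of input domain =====

-- B detects duplicate leading terminals by sorting them and scanning adjacent
-- pairs, instead of A's incremental seen-set membership loop; objective: alternative.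

-- ===== PORT A =====
-- inner 'for production in productions' loop with its incremental first_terminals set
def pvCheckProds : List String → PySem.Set Char → Bool
  | [], _ => true
  | p :: rest, seen =>
    match p.toList with
    | [] => false                      -- 'not production' → return False
    | c :: _ =>                        -- first_char = production[0]
      if PySem.Chars.isupper c then false
      else if PySem.Set.contains seen c then false
      else pvCheckProds rest (PySem.Set.add seen c)

def is_simple_grammar : List (String × List String) → Bool
  | [] => true
  | (_, prods) :: rest =>
    if pvCheckProds prods PySem.Set.empty then is_simple_grammar rest else false

-- ===== PORT B =====
-- 'not p or p[0].isupper()'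
def pvBadProd (p : String) : Bool :=
  match p.toList with
  | [] => true
  | c :: _ => PySem.Chars.isupper c

-- helper _rule_ok(productions) of Source B
def pvRuleOk (prods : List String) : Bool :=
  if prods.any pvBadProd then false
  else
    -- firsts = sorted(p[0] for p in productions); every p is non-empty past the
    -- validity pass, so headD's default is unreachable
    let firsts := PySem.List.sorted (prods.map (fun p => p.toList.headD ' ')) (fun c => c) false
    -- not any(x == y for x, y in zip(firsts, firsts[1:]))
    !((firsts.zip firsts.tail).any (fun q => q.1 == q.2))

def is_simple_grammar_alt (grammar : List (String × List String)) : Bool :=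
  grammar.all (fun g => pvRuleOk g.2)

-- ===== PRECONDITION & SPEC =====
def Spec_is_simple_grammar (grammar : List (String × List String)) (out : Bool) : Prop := out = is_simple_grammar_alt grammar
instance (grammar : List (String × List String)) (out : Bool) : Decidable (Spec_is_simple_grammar grammar out) := by unfold Spec_is_simple_grammar; infer_instance

-- ===== CLAIM (what is proved, stated in full; the proofs are below) =====
def Claim_equal_is_simple_grammar : Prop := ∀ (grammar : List (String × List String)), Dom_is_simple_grammar grammar → Spec_is_simple_grammar grammar (is_simple_grammar grammar)

-- ===== LEMMAS AND PROOFS =====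

-- characterisation of A's inner loop
lemma checkProds_iff (prods : List String) (seen : PySem.Set Char) :
    pvCheckProds prods seen = true ↔
      (∀ p ∈ prods, pvBadProd p = false) ∧
      (prods.map (fun p => p.toList.head?)).Nodup ∧
      (∀ p ∈ prods, ∀ c, p.toList.head? = some c → c ∉ seen) := by
  induction prods generalizing seen with
  | nil => simp [pvCheckProds]
  | cons p t ih =>
    cases hp : p.toList with
    | nil =>
      simp [pvCheckProds, hp, pvBadProd]
    | cons c cs =>
      by_cases hup : PySem.Chars.isupper c
      · simp [pvCheckProds, hp, hup, pvBadProd]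
      · by_cases hc : c ∈ seen
        · have hstep : pvCheckProds (p :: t) seen = false := by
            simp [pvCheckProds, hp, hup, hc]
          rw [hstep]
          constructor
          · intro h; simp at h
          · rintro ⟨-, -, hseen⟩
            exact absurd hc (hseen p (by simp) c (by simp [hp]))
        · have hstep : pvCheckProds (p :: t) seen = pvCheckProds t (PySem.Set.add seen c) := by
            simp [pvCheckProds, hp, hup, hc]
          rw [hstep, ih]
          constructor
          · rintro ⟨hval, hnd, hseen⟩
            refine ⟨?_, ?_, ?_⟩
            · intro q hq
              rcases List.mem_cons.mp hq with rfl | hq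
              · simp [pvBadProd, hp, hup]
              · exact hval q hq
            · simp only [List.map_cons, List.nodup_cons, hp, List.head?_cons]
              refine ⟨?_, hnd⟩
              intro hmem
              rcases List.mem_map.mp hmem with ⟨q, hq, hqc⟩
              exact (hseen q hq c hqc) (by simp [PySem.Set.mem_add])
            · intro q hq d hd
              rcases List.mem_cons.mp hq with rfl | hq
              · rw [hp] at hd; simp at hd; subst hd; exact hc
              · intro hmem
                exact (hseen q hq d hd) (by simp [PySem.Set.mem_add, hmem])
          · rintro ⟨hval, hnd, hseen⟩
            simp only [List.map_cons, List.nodup_cons, hp, List.head?_cons] at hnd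
            refine ⟨fun q hq => hval q (by simp [hq]), hnd.2, ?_⟩
            intro q hq d hd hmem
            rcases (PySem.Set.mem_add seen c d).mp hmem with hmem | rfl
            · exact hseen q (by simp [hq]) d hd hmem
            · exact hnd.1 (List.mem_map.mpr ⟨q, hq, hd⟩)

-- the adjacent-pair scan decides IsChain (· ≠ ·)
lemma zip_tail_any_eq_false_iff (l : List Char) :
    ((l.zip l.tail).any (fun q => q.1 == q.2) = false) ↔ l.IsChain (· ≠ ·) := by
  induction l with
  | nil => simp
  | cons a t ih =>
    cases t with
    | nil => simp
    | cons b u =>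
      simp only [List.tail_cons, List.zip_cons_cons, List.any_cons, Bool.or_eq_false_iff,
        List.isChain_cons_cons, beq_eq_false_iff_ne, ne_eq]
      exact and_congr_right (fun _ => by simpa using ih)

-- on an ascending list adjacent distinctness is nodup
lemma chain'_lt_of_pairwise_le (l : List Char) :
    l.Pairwise (· ≤ ·) → l.IsChain (· ≠ ·) → l.IsChain (· < ·) := by
  induction l with
  | nil => intro _ _; simp
  | cons a t ih =>
    cases t with
    | nil => intro _ _; simp
    | cons b u =>
      intro hpw hch
      rw [List.isChain_cons_cons] at hch ⊢
      rw [List.pairwise_cons] at hpw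
      exact ⟨lt_of_le_of_ne (hpw.1 b (by simp)) hch.1, ih hpw.2 hch.2⟩

lemma sorted_nodup_iff (xs : List Char) :
    ((PySem.List.sorted xs (fun c => c) false).IsChain (· ≠ ·)) ↔ xs.Nodup := by
  constructor
  · intro hch
    have hlt := chain'_lt_of_pairwise_le _ (PySem.List.sorted_pairwise xs (fun c => c)) hch
    have hpw : (PySem.List.sorted xs (fun c => c) false).Pairwise (· < ·) :=
      List.isChain_iff_pairwise.mp hlt
    have hnd : (PySem.List.sorted xs (fun c => c) false).Nodup :=
      hpw.imp (fun h => ne_of_lt h)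
    exact (PySem.List.sorted_perm xs (fun c => c) false).nodup_iff.mp hnd
  · intro hnd
    have : (PySem.List.sorted xs (fun c => c) false).Nodup :=
      (PySem.List.sorted_perm xs (fun c => c) false).nodup_iff.mpr hnd
    exact List.Pairwise.isChain this

-- characterisation of B's per-rule check
lemma ruleOk_iff (prods : List String) :
    pvRuleOk prods = true ↔
      (∀ p ∈ prods, pvBadProd p = false) ∧
      (prods.map (fun p => p.toList.head?)).Nodup := by
  by_cases hany : prods.any pvBadProd
  · have hg : pvRuleOk prods = false := by simp [pvRuleOk, hany]
    rw [hg]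
    constructor
    · intro h; simp at h
    · rintro ⟨hval, -⟩
      rcases List.any_eq_true.mp hany with ⟨q, hq, hbad⟩
      exact absurd (hval q hq) (by simp [hbad])
  · have hval : ∀ p ∈ prods, pvBadProd p = false := by
      intro q hq
      by_contra h
      exact hany (List.any_eq_true.mpr ⟨q, hq, by simpa using h⟩)
    have hheads : prods.map (fun p => p.toList.head?) =
        (prods.map (fun p => p.toList.headD ' ')).map some := by
      rw [List.map_map]
      apply List.map_congr_left
      intro q hq
      have := hval q hq
      cases hql : q.toList with
      | nil => simp [pvBadProd, hql] at this
      | cons c cs => simp [hql]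
    have hg : pvRuleOk prods =
        !(((PySem.List.sorted (prods.map (fun p => p.toList.headD ' ')) (fun c => c) false).zip
           (PySem.List.sorted (prods.map (fun p => p.toList.headD ' ')) (fun c => c) false).tail).any
           (fun q => q.1 == q.2)) := by
      simp [pvRuleOk, hany]
    rw [hg]
    constructor
    · intro h
      refine ⟨hval, ?_⟩
      rw [hheads]
      have hnd : (prods.map (fun p => p.toList.headD ' ')).Nodup := by
        rw [← sorted_nodup_iff, ← zip_tail_any_eq_false_iff]
        simpa using h
      exact hnd.map (fun _ _ h => Option.some_injective _ h)
    · rintro ⟨-, hnd⟩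
      rw [hheads] at hnd
      have hnd' : (prods.map (fun p => p.toList.headD ' ')).Nodup := by
        exact List.Nodup.of_map some hnd
      rw [← sorted_nodup_iff, ← zip_tail_any_eq_false_iff] at hnd'
      simpa using hnd'

lemma group_eq (prods : List String) :
    pvCheckProds prods PySem.Set.empty = pvRuleOk prods := by
  cases h : pvRuleOk prods
  · cases hA : pvCheckProds prods PySem.Set.empty
    · rfl
    · exfalso
      rcases (checkProds_iff prods PySem.Set.empty).mp hA with ⟨h1, h2, -⟩
      have := (ruleOk_iff prods).mpr ⟨h1, h2⟩
      rw [h] at this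
      simp at this
  · rcases (ruleOk_iff prods).mp h with ⟨h1, h2⟩
    exact (checkProds_iff prods PySem.Set.empty).mpr
      ⟨h1, h2, by intro q hq c hc hmem; simp [PySem.Set.empty] at hmem⟩

lemma main_eq (grammar : List (String × List String)) :
    is_simple_grammar grammar = is_simple_grammar_alt grammar := by
  induction grammar with
  | nil => rfl
  | cons g rest ih =>
    obtain ⟨nt, prods⟩ := g
    simp only [is_simple_grammar, is_simple_grammar_alt, List.all_cons, group_eq]
    cases pvRuleOk prods
    · simp
    · simpa [is_simple_grammar_alt] using ih

-- ===== VERDICT (by name: the statement is the Claim_ definition above) =====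
theorem is_simple_grammar_spec : Claim_equal_is_simple_grammar := by
  intro grammar _
  unfold Spec_is_simple_grammar
  exact main_eq grammar
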